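-- pv_equiv track=rewrite | github.com/JPinnell/Biblatex_check | biblatex_diagnostics.py | check_unclosed_math_mode
-- ===== SOURCE A (Python) =====
-- def check_unclosed_math_mode(text: str) -> bool:
--     """Check if there are unclosed $ symbols in LaTeX text."""
--     # Count $ symbols that aren't escaped
--     dollar_count = 0
--     i = 0
--     while i < len(text):
--         if text[i] == '$':
--             # Check if it's escaped
--             if i == 0 or text[i-1] != '\\':
--                 dollar_count += 1
--         i += 1
--
--     # Should be even (each opening $ has a closing $)
--     return dollar_count % 2 != 0
-- ===== SOURCE B (Python) =====
-- def check_unclosed_math_mode(text: str) -> bool: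
--     """Check if there are unclosed $ symbols in LaTeX text."""
--     return (text.count('$') - text.count('\\$')) % 2 != 0
-- ===== Notes on version B (the rewrite author's own statement) =====
-- stated objective: simpler
-- what changed: Replaced A's char-by-char index loop with an escape check per character by two built-in substring counts (all dollar signs minus backslash-escaped ones) followed by a parity test.
import Mathlib
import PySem

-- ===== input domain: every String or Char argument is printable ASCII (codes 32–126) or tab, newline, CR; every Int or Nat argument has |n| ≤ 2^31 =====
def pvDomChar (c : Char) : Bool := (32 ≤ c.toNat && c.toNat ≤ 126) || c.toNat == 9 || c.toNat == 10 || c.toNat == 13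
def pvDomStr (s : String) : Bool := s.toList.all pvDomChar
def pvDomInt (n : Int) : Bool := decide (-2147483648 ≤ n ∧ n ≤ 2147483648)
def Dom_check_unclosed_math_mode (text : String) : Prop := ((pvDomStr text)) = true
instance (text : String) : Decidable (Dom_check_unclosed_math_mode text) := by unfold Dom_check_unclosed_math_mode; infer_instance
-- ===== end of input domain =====

-- B replaces A's char-by-char index loop with two substring counts and a parity test (objective: simpler).


-- ===== PORT A =====
-- A's while loop over the index i; text[i-1] is only read when i ≠ 0, so the in-range
-- access is rendered with getD (the default is never used).
def checkLoopA (cs : List Char) (i : Nat) (dollar_count : Int) : Int :=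
  if i < cs.length then
    checkLoopA cs (i + 1)
      (if cs.getD i ' ' = '$' ∧ (i = 0 ∨ cs.getD (i - 1) ' ' ≠ '\\')
        then dollar_count + 1 else dollar_count)
  else dollar_count
termination_by cs.length - i

def check_unclosed_math_mode (text : String) : Bool :=
  PySem.Int.mod (checkLoopA text.toList 0 0) 2 ≠ 0

-- ===== PORT B =====
def check_unclosed_math_mode_alt (text : String) : Bool :=
  PySem.Int.mod ((PySem.Str.count text "$" : Int) - (PySem.Str.count text "\\$" : Int)) 2 ≠ 0

-- ===== PRECONDITION & SPEC =====
def Spec_check_unclosed_math_mode (text : String) (out : Bool) : Prop := out = check_unclosed_math_mode_alt text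
instance (text : String) (out : Bool) : Decidable (Spec_check_unclosed_math_mode text out) := by unfold Spec_check_unclosed_math_mode; infer_instance

-- ===== CLAIM (what is proved, stated in full; the proofs are below) =====
def Claim_equal_check_unclosed_math_mode : Prop := ∀ (text : String), Dom_check_unclosed_math_mode text → Spec_check_unclosed_math_mode text (check_unclosed_math_mode text)

-- ===== LEMMAS AND PROOFS =====

-- number of unescaped '$' in l, given that the char before l is `prev`
def unesc (prev : Char) : List Char → Nat
  | [] => 0
  | c :: t => (if c = '$' ∧ prev ≠ '\\' then 1 else 0) + unesc c t

-- number of positions j with l[j] = '\' and l[j+1] = '$'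
def escPairs : List Char → Nat
  | a :: b :: t => (if a = '\\' ∧ b = '$' then 1 else 0) + escPairs (b :: t)
  | _ => 0

theorem escPairs_cons_of_ne (prev : Char) (h : prev ≠ '\\') (l : List Char) :
    escPairs (prev :: l) = escPairs l := by
  cases l with
  | nil => rfl
  | cons b t => simp [escPairs, h]

theorem unesc_add_escPairs (prev : Char) (l : List Char) :
    unesc prev l + escPairs (prev :: l) = l.count '$' := by
  induction l generalizing prev with
  | nil => rfl
  | cons c t ih =>
    have := ih c
    by_cases hc : c = '$' <;> by_cases hp : prev = '\\' <;>
      simp [unesc, escPairs, hc, hp] at * <;> omega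

theorem go_dollar (fuel : Nat) (l : List Char) (acc : Nat) (h : l.length ≤ fuel) :
    PySem.Chars.count.go ['$'] fuel l acc = acc + l.count '$' := by
  induction fuel generalizing l acc with
  | zero =>
    have : l = [] := List.eq_nil_of_length_eq_zero (Nat.le_zero.mp h)
    subst this; rfl
  | succ n ih =>
    cases l with
    | nil => rfl
    | cons c t =>
      by_cases hc : c = '$'
      · have hpre : List.isPrefixOf ['$'] (c :: t) = true := by
          simp [List.isPrefixOf, hc]
        simp only [PySem.Chars.count.go, hpre, if_true]
        have ht : t.length ≤ n := by simpa using Nat.succ_le_succ_iff.mp (by simpa using h)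
        rw [show (c :: t).drop (['$'].length) = t by simp]
        rw [ih t (acc + 1) ht]
        simp [hc]; omega
      · have hpre : List.isPrefixOf ['$'] (c :: t) = false := by
          simp [List.isPrefixOf]; exact fun hx => (hc hx.symm).elim
        simp only [PySem.Chars.count.go, hpre, if_false, Bool.false_eq_true]
        have ht : t.length ≤ n := Nat.succ_le_succ_iff.mp (by simpa using h)
        rw [ih t acc ht]
        simp [hc]

theorem go_escaped (fuel : Nat) (l : List Char) (acc : Nat) (h : l.length ≤ fuel) :
    PySem.Chars.count.go ['\\', '$'] fuel l acc = acc + escPairs l := by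
  induction fuel generalizing l acc with
  | zero =>
    have : l = [] := List.eq_nil_of_length_eq_zero (Nat.le_zero.mp h)
    subst this; rfl
  | succ n ih =>
    cases l with
    | nil => rfl
    | cons a t =>
      cases t with
      | nil =>
        have hpre : List.isPrefixOf ['\\', '$'] [a] = false := by
          simp [List.isPrefixOf]
        simp only [PySem.Chars.count.go, hpre, if_false, Bool.false_eq_true]
        have : PySem.Chars.count.go ['\\', '$'] n [] acc = acc := by
          cases n <;> rfl
        rw [this]; rfl
      | cons b t' =>
        by_cases hab : a = '\\' ∧ b = '$'
        · have hpre : List.isPrefixOf ['\\', '$'] (a :: b :: t') = true := by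
            simp [List.isPrefixOf, hab.1, hab.2]
          simp only [PySem.Chars.count.go, hpre, if_true]
          rw [show (a :: b :: t').drop (['\\', '$'].length) = t' by simp]
          have ht : t'.length ≤ n := by
            simp only [List.length_cons] at h; omega
          rw [ih t' (acc + 1) ht]
          obtain ⟨ha, hb⟩ := hab; subst ha; subst hb
          rw [show escPairs ('\\' :: '$' :: t') = 1 + escPairs ('$' :: t') by simp [escPairs]]
          rw [escPairs_cons_of_ne '$' (by decide) t']
          omega
        · have hpre : List.isPrefixOf ['\\', '$'] (a :: b :: t') = false := by
            simp [List.isPrefixOf]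
            intro ha hb; exact hab ⟨ha.symm, hb.symm⟩
          simp only [PySem.Chars.count.go, hpre, if_false, Bool.false_eq_true]
          have ht : (b :: t').length ≤ n := by
            simp only [List.length_cons] at h ⊢; omega
          rw [ih (b :: t') acc ht]
          simp [escPairs, hab]

-- the char A consults as text[i-1] (any non-backslash default models the i = 0 case)
def prevAt (cs : List Char) (i : Nat) : Char :=
  if i = 0 then ' ' else cs.getD (i - 1) ' '

theorem prevAt_ne_backslash_iff (cs : List Char) (i : Nat) :
    (prevAt cs i ≠ '\\') ↔ (i = 0 ∨ cs.getD (i - 1) ' ' ≠ '\\') := by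
  unfold prevAt
  by_cases h : i = 0 <;> simp [h]

theorem checkLoopA_eq_unesc (cs : List Char) (i : Nat) (cnt : Int) (h : i ≤ cs.length) :
    checkLoopA cs i cnt = cnt + unesc (prevAt cs i) (cs.drop i) := by
  by_cases hlt : i < cs.length
  · rw [checkLoopA]
    simp only [hlt, if_true]
    have hdrop : cs.drop i = cs.getD i ' ' :: cs.drop (i + 1) := by
      rw [List.getD_eq_getElem cs ' ' hlt]
      exact List.drop_eq_getElem_cons hlt
    have hprev : prevAt cs (i + 1) = cs.getD i ' ' := by
      unfold prevAt; simp
    rw [checkLoopA_eq_unesc cs (i + 1) _ (by omega), hdrop, hprev, unesc]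
    by_cases hc : cs.getD i ' ' = '$' ∧ (i = 0 ∨ cs.getD (i - 1) ' ' ≠ '\\')
    · rw [if_pos hc, if_pos ⟨hc.1, (prevAt_ne_backslash_iff cs i).mpr hc.2⟩]
      push_cast; ring
    · rw [if_neg hc, if_neg (fun hx => hc ⟨hx.1, (prevAt_ne_backslash_iff cs i).mp hx.2⟩)]
      push_cast; ring
  · have hi : i = cs.length := by omega
    rw [checkLoopA]
    simp [hi, unesc]
  termination_by cs.length - i

theorem counts_eq (cs : List Char) :
    (cs.count '$' : Int) - (escPairs cs : Int) = (unesc ' ' cs : Int) := by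
  have h1 := unesc_add_escPairs ' ' cs
  have h2 : escPairs (' ' :: cs) = escPairs cs :=
    escPairs_cons_of_ne ' ' (by decide) cs
  rw [h2] at h1
  omega

-- ===== VERDICT (by name: the statement is the Claim_ definition above) =====
theorem check_unclosed_math_mode_spec : Claim_equal_check_unclosed_math_mode := by
  intro text _
  unfold Spec_check_unclosed_math_mode
  unfold check_unclosed_math_mode check_unclosed_math_mode_alt
  have hA : checkLoopA text.toList 0 0 = (unesc ' ' text.toList : Int) := by
    rw [checkLoopA_eq_unesc text.toList 0 0 (Nat.zero_le _)]
    simp [prevAt]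
  have hc1 : (PySem.Str.count text "$" : Nat) = text.toList.count '$' := by
    show PySem.Chars.count text.toList ['$'] = _
    unfold PySem.Chars.count
    rw [if_neg (by decide), go_dollar _ _ _ (le_refl _)]; omega
  have hc2 : (PySem.Str.count text "\\$" : Nat) = escPairs text.toList := by
    show PySem.Chars.count text.toList ['\\', '$'] = _
    unfold PySem.Chars.count
    rw [if_neg (by decide), go_escaped _ _ _ (le_refl _)]; omega
  rw [hA, hc1, hc2, counts_eq]
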